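-- pv_equiv track=rewrite | github.com/Dudusxx/Ativs | prova_domingo/Q1.py | def_int
-- ===== SOURCE A (Python) =====
-- def def_int(s):
--     if len(s) == 0:
--         return False
--     i = 0
--     if s[0] == '-':
--         if len(s) == 1:
--             return False
--         i = 1
--     while i < len(s):
--         if s[i] < '0' or s[i] > '9':
--             return False
--         i += 1
--     return True
-- ===== SOURCE B (Python) =====
-- def def_int(s):
--     if s in ('', '-'):
--         return False
--     t = s.strip('0123456789')
--     return t == '' or (t == '-' and s[0] == '-')
-- ===== Notes on version B (the rewrite author's own statement) =====
-- stated objective: alternative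
-- what changed: Instead of scanning characters with an index loop, B strips all digit characters from both ends with str.strip('0123456789') and classifies the residue: an empty residue means all digits, a residue that is a single minus sign which is also the first character means a negated digit string; empty and lone-minus inputs are rejected up front.
import Mathlib
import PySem

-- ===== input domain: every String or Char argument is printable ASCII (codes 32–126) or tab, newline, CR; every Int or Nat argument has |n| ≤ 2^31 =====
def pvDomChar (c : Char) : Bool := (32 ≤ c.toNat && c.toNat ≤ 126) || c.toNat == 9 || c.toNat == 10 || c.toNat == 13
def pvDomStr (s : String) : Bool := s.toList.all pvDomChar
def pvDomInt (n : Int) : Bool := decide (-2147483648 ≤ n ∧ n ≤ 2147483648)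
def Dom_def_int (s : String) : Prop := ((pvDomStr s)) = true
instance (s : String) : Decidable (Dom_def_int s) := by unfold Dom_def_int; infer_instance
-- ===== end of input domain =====

-- B strips all digits off both ends with str.strip('0123456789') and classifies the residue
-- instead of scanning with an index loop (alternative decomposition; same O(n) cost).

-- ===== PORT A =====
-- A's while loop from index i to the end, as structural recursion over the remaining characters.
def defIntLoop : List Char → Bool
  | [] => true
  | c :: rest => if c < '0' || '9' < c then false else defIntLoop rest

def def_int (s : String) : Bool :=
  match s.toList with
  | [] => false                      -- len(s) == 0
  | c :: rest =>
    if c = '-' then                  -- s[0] == '-'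
      match rest with
      | [] => false                  -- len(s) == 1
      | _ => defIntLoop rest         -- loop from i = 1
    else defIntLoop (c :: rest)      -- loop from i = 0

-- ===== PORT B =====
def def_int_alt (s : String) : Bool :=
  if s == "" || s == "-" then false
  else
    let t := PySem.Str.stripChars s "0123456789"
    (t == "") || ((t == "-") && (PySem.Str.pyGet? s 0 == some '-'))

-- ===== PRECONDITION & SPEC =====
def Spec_def_int (s : String) (out : Bool) : Prop := out = def_int_alt s
instance (s : String) (out : Bool) : Decidable (Spec_def_int s out) := by unfold Spec_def_int; infer_instance

-- ===== CLAIM (what is proved, stated in full; the proofs are below) =====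
def Claim_equal_def_int : Prop := ∀ (s : String), Dom_def_int s → Spec_def_int s (def_int s)

-- ===== LEMMAS AND PROOFS =====
theorem contains_digits (c : Char) :
    (("0123456789" : String).toList).contains c = PySem.Chars.isdigit c := by
  have hl : ("0123456789" : String).toList = ['0','1','2','3','4','5','6','7','8','9'] := by decide
  rw [hl, Bool.eq_iff_iff]
  simp only [List.contains_eq_any_beq, List.any_cons, List.any_nil, Bool.or_eq_true,
    beq_iff_eq, PySem.Chars.isdigit, Bool.and_eq_true, decide_eq_true_eq,
    Char.le_def, Char.ext_iff, UInt32.le_iff_toNat_le, UInt32.ext_iff,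
    show ('0').val.toNat = 48 from rfl, show ('1').val.toNat = 49 from rfl,
    show ('2').val.toNat = 50 from rfl, show ('3').val.toNat = 51 from rfl,
    show ('4').val.toNat = 52 from rfl, show ('5').val.toNat = 53 from rfl,
    show ('6').val.toNat = 54 from rfl, show ('7').val.toNat = 55 from rfl,
    show ('8').val.toNat = 56 from rfl, show ('9').val.toNat = 57 from rfl,
    Bool.false_eq_true, or_false]
  omega

theorem defIntLoop_eq_all (cs : List Char) : defIntLoop cs = cs.all PySem.Chars.isdigit := by
  induction cs with
  | nil => rfl
  | cons c rest ih =>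
    simp only [defIntLoop, List.all_cons, PySem.Chars.isdigit, ih]
    by_cases h0 : c < '0'
    · simp [h0, not_le.mpr h0]
    · by_cases h9 : '9' < c
      · simp [h9, not_le.mpr h9]
      · simp [h0, h9, not_lt.mp h0, not_lt.mp h9]

theorem dropWhile_digits_nil_iff (xs : List Char) :
    xs.dropWhile PySem.Chars.isdigit = [] ↔ xs.all PySem.Chars.isdigit = true := by
  rw [List.dropWhile_eq_nil_iff, List.all_eq_true]

theorem strip_nil_iff (cs : List Char) :
    PySem.Chars.stripChars cs ("0123456789" : String).toList = [] ↔
      cs.all PySem.Chars.isdigit = true := by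
  unfold PySem.Chars.stripChars
  simp only [funext contains_digits, List.reverse_eq_nil_iff, List.dropWhile_eq_nil_iff,
    List.mem_reverse]
  constructor
  · intro h
    rcases hd : cs.dropWhile PySem.Chars.isdigit with _ | ⟨a, l⟩
    · exact (dropWhile_digits_nil_iff cs).mp hd
    · have hna : PySem.Chars.isdigit a = false := by
        have := List.head_dropWhile_not PySem.Chars.isdigit (l := cs)
        simpa [hd] using this
      have := h a (by simp [hd])
      simp [hna] at this
  · intro h
    have : cs.dropWhile PySem.Chars.isdigit = [] := (dropWhile_digits_nil_iff cs).mpr h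
    simp [this]

theorem strip_neg_iff (rest : List Char) :
    PySem.Chars.stripChars ('-' :: rest) ("0123456789" : String).toList = ['-'] ↔
      rest.all PySem.Chars.isdigit = true := by
  have hfun : (fun c => (("0123456789" : String).toList).contains c) = PySem.Chars.isdigit :=
    funext contains_digits
  have hneg : ¬ PySem.Chars.isdigit '-' = true := by decide
  unfold PySem.Chars.stripChars
  simp only [hfun]
  show (List.dropWhile PySem.Chars.isdigit
      (List.dropWhile PySem.Chars.isdigit ('-' :: rest)).reverse).reverse = ['-'] ↔ _
  rw [List.dropWhile_cons_of_neg hneg, List.reverse_cons, List.dropWhile_append]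
  rcases hd : rest.reverse.dropWhile PySem.Chars.isdigit with _ | ⟨a, l⟩
  · simp only [List.isEmpty_nil, if_true]
    rw [List.dropWhile_cons_of_neg hneg]
    simp only [List.reverse_cons, List.reverse_nil, List.nil_append]
    constructor
    · intro _
      rw [List.dropWhile_eq_nil_iff] at hd
      rw [List.all_eq_true]; intro x hx; exact hd x (List.mem_reverse.mpr hx)
    · intro _; trivial
  · simp only [List.isEmpty_cons, Bool.false_eq_true, if_false]
    constructor
    · intro h
      have hlen := congrArg List.length h
      simp at hlen
    · intro h
      exfalso
      have hnil : rest.reverse.dropWhile PySem.Chars.isdigit = [] := by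
        rw [List.dropWhile_eq_nil_iff]; intro x hx
        exact (List.all_eq_true.mp h) x (List.mem_reverse.mp hx)
      rw [hnil] at hd; cases hd

-- ===== VERDICT (by name: the statement is the Claim_ definition above) =====
theorem def_int_spec : Claim_equal_def_int := by
  intro s _
  unfold Spec_def_int def_int def_int_alt
  rcases h : s.toList with _ | ⟨c, rest⟩
  · have hs : s = "" := String.toList_inj.mp (by simp [h])
    simp [hs]
  · have hne : ¬ s = "" := by
      intro hs; rw [hs] at h; cases h
    by_cases hc : c = '-'
    · subst hc
      rcases rest with _ | ⟨d, ds⟩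
      · have hs : s = "-" := String.toList_inj.mp (by rw [h]; rfl)
        simp [hs]
      · have hne2 : ¬ s = "-" := by
          intro hs; rw [hs] at h; cases h
        have hget : PySem.Str.pyGet? s 0 = some '-' := by
          have he : PySem.Str.pyGet? s 0 = PySem.List.pyGet? s.toList 0 := by simp
          rw [he, h, show (0:Int) = ((0:Nat):Int) from rfl, PySem.List.pyGet?_natCast]
          rfl
        have hstrip : (PySem.Str.stripChars s "0123456789").toList =
            PySem.Chars.stripChars ('-' :: d :: ds) ("0123456789" : String).toList := by
          simp [PySem.Str.stripChars, h]
        simp only [hget, BEq.rfl, Bool.and_true]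
        rcases hall : (d :: ds).all PySem.Chars.isdigit with _ | _
        · have h1 : ¬ (PySem.Str.stripChars s "0123456789") = "" := by
            intro hx
            have : PySem.Chars.stripChars ('-' :: d :: ds) ("0123456789" : String).toList = [] := by
              rw [← hstrip, hx]; rfl
            have := (strip_nil_iff _).mp this
            simp [PySem.Chars.isdigit] at this
          have h2 : ¬ (PySem.Str.stripChars s "0123456789") = "-" := by
            intro hx
            have : PySem.Chars.stripChars ('-' :: d :: ds) ("0123456789" : String).toList = ['-'] := by
              rw [← hstrip, hx]; rfl
            rw [strip_neg_iff] at this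
            rw [this] at hall; cases hall
          simp [defIntLoop_eq_all, hall, h1, h2, hne, hne2]
        · have h2 : (PySem.Str.stripChars s "0123456789") = "-" := by
            apply String.toList_inj.mp
            rw [hstrip]
            exact (strip_neg_iff _).mpr hall
          simp [defIntLoop_eq_all, hall, h2, hne, hne2]
    · have hne2 : ¬ s = "-" := by
        intro hs; rw [hs] at h
        cases h; exact hc rfl
      have hstrip : (PySem.Str.stripChars s "0123456789").toList =
          PySem.Chars.stripChars (c :: rest) ("0123456789" : String).toList := by
        simp [PySem.Str.stripChars, h]
      have hget : PySem.Str.pyGet? s 0 = some c := by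
        have he : PySem.Str.pyGet? s 0 = PySem.List.pyGet? s.toList 0 := by simp
        rw [he, h, show (0:Int) = ((0:Nat):Int) from rfl, PySem.List.pyGet?_natCast]
        rfl
      simp only [if_neg hc, hget]
      rcases hall : (c :: rest).all PySem.Chars.isdigit with _ | _
      · have h1 : ¬ (PySem.Str.stripChars s "0123456789") = "" := by
          intro hx
          have : PySem.Chars.stripChars (c :: rest) ("0123456789" : String).toList = [] := by
            rw [← hstrip, hx]; rfl
          rw [strip_nil_iff] at this
          rw [this] at hall; cases hall
        simp [defIntLoop_eq_all, hall, h1, hc, hne, hne2]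
      · have h1 : (PySem.Str.stripChars s "0123456789") = "" := by
          apply String.toList_inj.mp
          rw [hstrip]
          exact (strip_nil_iff _).mpr hall
        simp [defIntLoop_eq_all, hall, h1, hne, hne2]
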